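-- pv_equiv track=rewrite | github.com/yw22/TIL | CodingTest/프로그래머스/Level_1/신고_결과_받기.py | solution
-- ===== SOURCE A (Python) =====
-- from collections import defaultdict
--
-- def solution(id_list, report, k):
--     answer = []
--
--     x = defaultdict(set)
--     y = defaultdict(set)
--     for i in report:
--         report_from, report_to = i.split(' ')
--         x[report_from].add(report_to)
--         y[report_to].add(report_from)
--
--     for id in id_list:
--         count = 0
--         for re in x[id]:
--             if len(y[re]) >= k:
--                 count += 1
--         answer.append(count)
--     return answer
-- ===== SOURCE B (Python) =====
-- def solution(id_list, report, k):
--     # deduplicate reports into first-occurrence-ordered (reporter, target) pairs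
--     seen = set()
--     pairs = []
--     for r in report:
--         f, t = r.split(' ')
--         if (f, t) not in seen:
--             seen.add((f, t))
--             pairs.append((f, t))
--     # unique-reporter count per target, then the banned targets
--     nrep = {}
--     for f, t in pairs:
--         nrep[t] = nrep.get(t, 0) + 1
--     banned = {t for t, c in nrep.items() if c >= k}
--     # one flat pass accumulating per-reporter mail counts
--     cnt = {}
--     for f, t in pairs:
--         if t in banned:
--             cnt[f] = cnt.get(f, 0) + 1
--     return [cnt.get(i, 0) for i in id_list]
-- ===== Notes on version B (the rewrite author's own statement) =====
-- stated objective: alternative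
-- what changed: Replaces A's per-id nested scan over defaultdict-of-sets x[id] (testing len(y[t]) >= k inside the loop) with a deduplicated pair list, a precomputed banned-target set, and a single flat accumulator pass keyed by reporter, reading results off with get(id, 0).
import Mathlib
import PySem

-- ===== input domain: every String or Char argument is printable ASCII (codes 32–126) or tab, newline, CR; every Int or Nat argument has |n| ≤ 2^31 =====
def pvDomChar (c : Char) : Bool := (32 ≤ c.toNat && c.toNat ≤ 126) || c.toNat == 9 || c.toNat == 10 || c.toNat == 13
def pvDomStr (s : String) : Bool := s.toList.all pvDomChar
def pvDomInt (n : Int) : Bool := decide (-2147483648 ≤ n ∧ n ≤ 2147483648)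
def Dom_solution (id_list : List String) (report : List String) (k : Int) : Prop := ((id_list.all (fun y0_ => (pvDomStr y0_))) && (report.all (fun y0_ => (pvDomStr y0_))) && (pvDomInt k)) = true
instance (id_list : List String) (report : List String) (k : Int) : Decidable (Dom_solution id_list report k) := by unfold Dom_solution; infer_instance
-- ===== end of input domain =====

-- B replaces A's per-id nested scan over defaultdict-of-sets with a dedup'd pair list,
-- a precomputed banned-target set and one flat reporter-keyed accumulator pass (alternative decomposition).

-- ===== PORT A =====
-- x, y are defaultdict(set); the loop `for i in report` splits each report and fills both.
-- A row whose split is not exactly two words makes Python raise ValueError (unpacking) —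
-- excluded by Pre_solution; the port leaves the state unchanged there.
def solution (id_list : List String) (report : List String) (k : Int) : List Int :=
  let xy :=
    report.foldl
      (fun (xy : PySem.Dict String (PySem.Set String) × PySem.Dict String (PySem.Set String)) i =>
        match (PySem.Str.split? i " ").getD [] with
        | [rf, rt] =>
            (PySem.Dict.modify xy.1 rf PySem.Set.empty (fun s => PySem.Set.add s rt),
             PySem.Dict.modify xy.2 rt PySem.Set.empty (fun s => PySem.Set.add s rf))
        | _ => xy)
      (PySem.Dict.empty, PySem.Dict.empty)
  -- `for id in id_list: count = 0; for re in x[id]: if len(y[re]) >= k: count += 1; answer.append(count)`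
  -- (the inner loop only counts, so Python's set-iteration order cannot affect the value)
  id_list.map (fun id =>
    (PySem.Dict.getD xy.1 id PySem.Set.empty).foldl
      (fun count re =>
        if k ≤ PySem.Set.len (PySem.Dict.getD xy.2 re PySem.Set.empty) then count + 1 else count)
      (0 : Int))

-- ===== PORT B =====
-- dedup the parsed reports into first-occurrence (reporter, target) pairs, count unique
-- reporters per target, take the banned targets, then one flat accumulating pass.
def solution_alt (id_list : List String) (report : List String) (k : Int) : List Int :=
  let pairs :=
    report.foldl
      (fun (acc : PySem.Set (String × String)) r =>
        match (PySem.Str.split? r " ").getD [] with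
        | [] => acc
        | [_] => acc
        | [f, t] => PySem.Set.add acc (f, t)
        | _ :: _ :: _ :: _ => acc)
      PySem.Set.empty
  let nrep :=
    pairs.foldl
      (fun (d : PySem.Dict String Int) p => PySem.Dict.insert d p.2 (PySem.Dict.getD d p.2 0 + 1))
      PySem.Dict.empty
  let banned :=
    PySem.Set.ofList ((nrep.items.filter (fun it => k ≤ it.2)).map (fun it => it.1))
  let cnt :=
    pairs.foldl
      (fun (d : PySem.Dict String Int) p =>
        if PySem.Set.contains banned p.2 then PySem.Dict.insert d p.1 (PySem.Dict.getD d p.1 0 + 1)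
        else d)
      PySem.Dict.empty
  id_list.map (fun id => PySem.Dict.getD cnt id 0)

-- ===== PRECONDITION & SPEC =====
-- Pre_ excludes exactly the reports that do not split into two space-separated words:
-- there Python's `report_from, report_to = i.split(' ')` raises ValueError.
def Pre_solution (id_list : List String) (report : List String) (k : Int) : Prop :=
  ∀ r ∈ report, ((PySem.Str.split? r " ").getD []).length = 2
instance (id_list : List String) (report : List String) (k : Int) : Decidable (Pre_solution id_list report k) := by unfold Pre_solution; infer_instance

def pvWitness_solution : List String × List String × Int :=
  (["muzi", "frodo"], ["muzi frodo", "apeach frodo"], 1)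

def Spec_solution (id_list : List String) (report : List String) (k : Int) (out : List Int) : Prop := out = solution_alt id_list report k
instance (id_list : List String) (report : List String) (k : Int) (out : List Int) : Decidable (Spec_solution id_list report k out) := by unfold Spec_solution; infer_instance

-- ===== CLAIM (what is proved, stated in full; the proofs are below) =====
def Claim_equal_solution : Prop := ∀ (id_list : List String) (report : List String) (k : Int), Dom_solution id_list report k → Pre_solution id_list report k → Spec_solution id_list report k (solution id_list report k)

-- ===== LEMMAS AND PROOFS =====

def pparse (r : String) : Option (String × String) :=
  match (PySem.Str.split? r " ").getD [] with
  | [f, t] => some (f, t)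
  | _ => none

-- the A-side pair fold over report equals a fold over the parsed pair list
theorem foldA_eq (rs : List String)
    (init : PySem.Dict String (PySem.Set String) × PySem.Dict String (PySem.Set String)) :
    rs.foldl
      (fun (xy : PySem.Dict String (PySem.Set String) × PySem.Dict String (PySem.Set String)) i =>
        match (PySem.Str.split? i " ").getD [] with
        | [rf, rt] =>
            (PySem.Dict.modify xy.1 rf PySem.Set.empty (fun s => PySem.Set.add s rt),
             PySem.Dict.modify xy.2 rt PySem.Set.empty (fun s => PySem.Set.add s rf))
        | _ => xy) init
    = (rs.filterMap pparse).foldl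
      (fun xy p =>
        (PySem.Dict.modify xy.1 p.1 PySem.Set.empty (fun s => PySem.Set.add s p.2),
         PySem.Dict.modify xy.2 p.2 PySem.Set.empty (fun s => PySem.Set.add s p.1))) init := by
  induction rs generalizing init with
  | nil => rfl
  | cons r rs ih =>
    simp only [List.foldl_cons, List.filterMap_cons]
    have hp : pparse r = (match (PySem.Str.split? r " ").getD [] with
      | [f, t] => some (f, t)
      | _ => none) := rfl
    rcases h : (PySem.Str.split? r " ").getD [] with _ | ⟨a, _ | ⟨b, _ | _⟩⟩ <;>
      simp only [h] at hp ⊢ <;> simp only [hp, List.foldl_cons] <;> exact ih _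

theorem foldB_eq (rs : List String) (init : PySem.Set (String × String)) :
    rs.foldl
      (fun (acc : PySem.Set (String × String)) r =>
        match (PySem.Str.split? r " ").getD [] with
        | [] => acc
        | [_] => acc
        | [f, t] => PySem.Set.add acc (f, t)
        | _ :: _ :: _ :: _ => acc) init
    = (rs.filterMap pparse).foldl PySem.Set.add init := by
  induction rs generalizing init with
  | nil => rfl
  | cons r rs ih =>
    simp only [List.foldl_cons, List.filterMap_cons]
    have hp : pparse r = (match (PySem.Str.split? r " ").getD [] with
      | [f, t] => some (f, t)
      | _ => none) := rfl
    rcases h : (PySem.Str.split? r " ").getD [] with _ | ⟨a, _ | ⟨b, _ | _⟩⟩ <;>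
      simp only [h] at hp ⊢ <;> simp only [hp, List.foldl_cons] <;> exact ih _

-- getD after a modify/Set.add grouping loop: the set accumulated at key c
theorem getD_foldl_modify_setAdd (l : List (String × String))
    (d : PySem.Dict String (PySem.Set String)) (c : String) :
    PySem.Dict.getD
      (l.foldl (fun d p => PySem.Dict.modify d p.1 PySem.Set.empty (fun s => PySem.Set.add s p.2)) d)
      c PySem.Set.empty
    = PySem.Set.update (PySem.Dict.getD d c PySem.Set.empty)
        ((l.filter (fun p => p.1 == c)).map (fun p => p.2)) := by
  induction l generalizing d with
  | nil => rfl
  | cons p l ih =>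
    simp only [List.foldl_cons, List.filter_cons]
    by_cases h : p.1 = c
    · simp only [h, beq_self_eq_true, if_pos, List.map_cons]
      rw [ih]
      rw [PySem.Dict.getD_modify]
      simp [h, PySem.Set.update]
    · have hb : (p.1 == c) = false := by simp [h]
      simp only [hb, Bool.false_eq_true, if_neg, not_false_iff]
      rw [ih, PySem.Dict.getD_modify]
      simp [Ne.symm h]

-- dedup (Set.update) commutes with filter + an injective-on-the-filter projection
theorem update_filter_map (pr : String × String → Bool) (f : String × String → String)
    (hinj : ∀ p q, pr p = true → pr q = true → f p = f q → p = q)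
    (L : List (String × String)) (s : List (String × String)) :
    PySem.Set.update ((s.filter pr).map f) ((L.filter pr).map f)
      = ((PySem.Set.update s L).filter pr).map f := by
  induction L generalizing s with
  | nil => rfl
  | cons p L ih =>
    have hadd : PySem.Set.update s (p :: L) = PySem.Set.update (PySem.Set.add s p) L := rfl
    by_cases hp : pr p = true
    · have hmem : (f p ∈ (s.filter pr).map f) ↔ p ∈ s := by
        constructor
        · rintro hm
          rcases List.mem_map.mp hm with ⟨q, hq, hfq⟩
          rcases List.mem_filter.mp hq with ⟨hqs, hqpr⟩
          rwa [hinj q p hqpr hp hfq] at hqs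
        · intro hs
          exact List.mem_map_of_mem (List.mem_filter.mpr ⟨hs, hp⟩)
      simp only [List.filter_cons, hp, if_pos, List.map_cons]
      rw [hadd]
      by_cases hs : p ∈ s
      · have h1 : PySem.Set.add s p = s := by
          simp [PySem.Set.add, PySem.Set.contains, List.elem_eq_contains, List.contains_iff_mem, hs]
        have h2 : PySem.Set.add ((s.filter pr).map f) (f p) = (s.filter pr).map f := by
          simp [PySem.Set.add, PySem.Set.contains, List.elem_eq_contains, List.contains_iff_mem,
            hmem.mpr hs]
        rw [h1, ← ih s]
        simp [PySem.Set.update, h2]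
      · have h1 : PySem.Set.add s p = s ++ [p] := by
          simp [PySem.Set.add, PySem.Set.contains, List.elem_eq_contains, List.contains_iff_mem, hs]
        have h2 : PySem.Set.add ((s.filter pr).map f) (f p) = (s.filter pr).map f ++ [f p] := by
          simp only [PySem.Set.add, PySem.Set.contains, List.elem_eq_contains,
            List.contains_iff_mem]
          simp [hmem, hs]
        have h3 : ((s ++ [p]).filter pr).map f = (s.filter pr).map f ++ [f p] := by
          simp [List.filter_append, List.filter_cons, hp]
        rw [h1, ← ih (s ++ [p]), h3]
        simp [PySem.Set.update, h2]
    · have hpf : pr p = false := by simpa using hp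
      simp only [List.filter_cons, hpf, Bool.false_eq_true, if_neg, not_false_iff]
      rw [hadd, ← ih (PySem.Set.add s p)]
      have : (PySem.Set.add s p).filter pr = s.filter pr := by
        by_cases hs : p ∈ s
        · simp [PySem.Set.add, PySem.Set.contains, List.elem_eq_contains, List.contains_iff_mem, hs]
        · simp [PySem.Set.add, PySem.Set.contains, List.elem_eq_contains, List.contains_iff_mem,
            hs, List.filter_append, List.filter_cons, hpf]
      rw [this]

-- x's entry at id, read off the dedup'd pair list
theorem getX_eq (L : List (String × String)) (c : String) :
    PySem.Dict.getD
      (L.foldl (fun d p => PySem.Dict.modify d p.1 PySem.Set.empty (fun s => PySem.Set.add s p.2)) PySem.Dict.empty)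
      c PySem.Set.empty
    = ((L.foldl PySem.Set.add PySem.Set.empty).filter (fun p => p.1 == c)).map (fun p => p.2) := by
  rw [getD_foldl_modify_setAdd]
  exact update_filter_map (fun p => p.1 == c) (fun p => p.2)
    (by
      intro p q hp hq hf
      have h1 : p.1 = c := by simpa using hp
      have h2 : q.1 = c := by simpa using hq
      exact Prod.ext (h1.trans h2.symm) hf) L []

-- Set.add folding commutes with the swap of every pair
theorem setAdd_map_swap (L : List (String × String)) (s : List (String × String)) :
    (L.map Prod.swap).foldl PySem.Set.add (s.map Prod.swap)
      = (L.foldl PySem.Set.add s).map Prod.swap := by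
  induction L generalizing s with
  | nil => rfl
  | cons p L ih =>
    simp only [List.map_cons, List.foldl_cons]
    by_cases hs : p ∈ s
    · have h1 : PySem.Set.add s p = s := by
        simp [PySem.Set.add, PySem.Set.contains, List.contains_iff_mem, hs]
      have h2 : PySem.Set.add (s.map Prod.swap) p.swap = s.map Prod.swap := by
        simp [PySem.Set.add, PySem.Set.contains, List.contains_iff_mem]
        exact hs
      rw [h1, h2, ih s]
    · have h1 : PySem.Set.add s p = s ++ [p] := by
        simp [PySem.Set.add, PySem.Set.contains, List.contains_iff_mem, hs]
      have h2 : PySem.Set.add (s.map Prod.swap) p.swap = s.map Prod.swap ++ [p.swap] := by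
        have : ¬ p.swap ∈ s.map Prod.swap := by
          intro hm
          rcases List.mem_map.mp hm with ⟨q, hq, hfq⟩
          exact hs (by rwa [Prod.swap_injective hfq] at hq)
        simp [PySem.Set.add, PySem.Set.contains, List.contains_iff_mem, this]
      rw [h1, h2]
      have hmap : List.map Prod.swap (s ++ [p]) = List.map Prod.swap s ++ [p.swap] := by simp
      rw [← hmap, ih (s ++ [p])]

-- y's entry at t, read off the dedup'd pair list
theorem getY_eq (L : List (String × String)) (c : String) :
    PySem.Dict.getD
      (L.foldl (fun d p => PySem.Dict.modify d p.2 PySem.Set.empty (fun s => PySem.Set.add s p.1)) PySem.Dict.empty)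
      c PySem.Set.empty
    = ((L.foldl PySem.Set.add PySem.Set.empty).filter (fun p => p.2 == c)).map (fun p => p.1) := by
  have hswap : L.foldl (fun d p => PySem.Dict.modify d p.2 PySem.Set.empty (fun s => PySem.Set.add s p.1)) PySem.Dict.empty
      = (L.map Prod.swap).foldl (fun d p => PySem.Dict.modify d p.1 PySem.Set.empty (fun s => PySem.Set.add s p.2)) PySem.Dict.empty := by
    rw [List.foldl_map]
    rfl
  have hPswap : (L.map Prod.swap).foldl PySem.Set.add PySem.Set.empty
      = (L.foldl PySem.Set.add PySem.Set.empty).map Prod.swap := by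
    have := setAdd_map_swap L []
    simpa using this
  rw [hswap, getX_eq, hPswap]
  rw [List.filter_map, List.map_map]
  simp only [Function.comp_def, Prod.fst_swap, Prod.snd_swap]

-- B's accumulator read off: count of c among reporters of banned dedup'd pairs
theorem cnt_getD (P : List (String × String)) (banned : PySem.Set String) (c : String) :
    PySem.Dict.getD
      (P.foldl
        (fun (d : PySem.Dict String Int) p =>
          if PySem.Set.contains banned p.2 then PySem.Dict.insert d p.1 (PySem.Dict.getD d p.1 0 + 1)
          else d)
        PySem.Dict.empty) c 0
    = (((P.filter (fun p => PySem.Set.contains banned p.2)).map (fun p => p.1)).count c : Int) := by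
  rw [← List.foldl_filter]
  rw [← List.foldl_map (f := fun (p : String × String) => p.1)
      (g := fun (d : PySem.Dict String Int) x => PySem.Dict.insert d x (PySem.Dict.getD d x 0 + 1))]
  rw [PySem.Dict.getD_foldl_insert_add_one]
  simp

-- membership in B's banned set
theorem mem_banned (P : List (String × String)) (k : Int) (t : String) :
    t ∈ PySem.Set.ofList
        ((((P.foldl
            (fun (d : PySem.Dict String Int) p => PySem.Dict.insert d p.2 (PySem.Dict.getD d p.2 0 + 1))
            PySem.Dict.empty)).items.filter (fun it => k ≤ it.2)).map (fun it => it.1))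
    ↔ (t ∈ P.map (fun p => p.2) ∧ k ≤ ((P.map (fun p => p.2)).count t : Int)) := by
  have h1 : P.foldl
      (fun (d : PySem.Dict String Int) p => PySem.Dict.insert d p.2 (PySem.Dict.getD d p.2 0 + 1))
      PySem.Dict.empty
      = (P.map (fun p => p.2)).foldl
        (fun (d : PySem.Dict String Int) x => PySem.Dict.insert d x (PySem.Dict.getD d x 0 + 1))
        PySem.Dict.empty := by
    rw [List.foldl_map]
  rw [h1, PySem.Dict.foldl_insert_getD_add_one_eq_counter, PySem.Dict.items_counter]
  rw [List.filter_map, List.map_map]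
  simp [List.mem_map, List.mem_filter, PySem.Set.mem_ofList, Function.comp]

-- Prop-conditioned corollary of PySem.List.foldl_count_if
theorem foldl_count_if' (p : String → Prop) [DecidablePred p] (l : List String) (a : Int) :
    l.foldl (fun acc x => if p x then acc + 1 else acc) a
      = a + (l.countP (fun x => decide (p x)) : Int) := by
  have := PySem.List.foldl_count_if (fun x => decide (p x)) l a
  simpa using this

theorem solution_eq_alt (id_list report : List String) (k : Int) :
    (let xy :=
      report.foldl
        (fun (xy : PySem.Dict String (PySem.Set String) × PySem.Dict String (PySem.Set String)) i =>
          match (PySem.Str.split? i " ").getD [] with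
          | [rf, rt] =>
              (PySem.Dict.modify xy.1 rf PySem.Set.empty (fun s => PySem.Set.add s rt),
               PySem.Dict.modify xy.2 rt PySem.Set.empty (fun s => PySem.Set.add s rf))
          | _ => xy)
        (PySem.Dict.empty, PySem.Dict.empty)
     id_list.map (fun id =>
      (PySem.Dict.getD xy.1 id PySem.Set.empty).foldl
        (fun count re =>
          if k ≤ PySem.Set.len (PySem.Dict.getD xy.2 re PySem.Set.empty) then count + 1 else count)
        (0 : Int)))
    =
    (let pairs :=
      report.foldl
        (fun (acc : PySem.Set (String × String)) r =>
          match (PySem.Str.split? r " ").getD [] with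
          | [] => acc
          | [_] => acc
          | [f, t] => PySem.Set.add acc (f, t)
          | _ :: _ :: _ :: _ => acc)
        PySem.Set.empty
     let nrep :=
      pairs.foldl
        (fun (d : PySem.Dict String Int) p => PySem.Dict.insert d p.2 (PySem.Dict.getD d p.2 0 + 1))
        PySem.Dict.empty
     let banned :=
      PySem.Set.ofList ((nrep.items.filter (fun it => k ≤ it.2)).map (fun it => it.1))
     let cnt :=
      pairs.foldl
        (fun (d : PySem.Dict String Int) p =>
          if PySem.Set.contains banned p.2 then PySem.Dict.insert d p.1 (PySem.Dict.getD d p.1 0 + 1)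
          else d)
        PySem.Dict.empty
     id_list.map (fun id => PySem.Dict.getD cnt id 0)) := by
  simp only []
  rw [foldA_eq, foldB_eq]
  rw [PySem.List.foldl_prod_mk
    (f := fun d (p : String × String) => PySem.Dict.modify d p.1 PySem.Set.empty (fun s => PySem.Set.add s p.2))
    (g := fun d (p : String × String) => PySem.Dict.modify d p.2 PySem.Set.empty (fun s => PySem.Set.add s p.1))]
  dsimp only
  set L := report.filterMap pparse with hL
  congr 1
  funext id
  rw [getX_eq]
  simp only [getY_eq]
  rw [foldl_count_if' (p := fun re => k ≤ PySem.Set.len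
      (((L.foldl PySem.Set.add PySem.Set.empty).filter (fun p => p.2 == re)).map (fun p => p.1)))]
  rw [cnt_getD]
  set P := L.foldl PySem.Set.add PySem.Set.empty with hPdef
  rw [List.countP_map, List.count_eq_countP, List.countP_map, List.countP_filter, List.countP_filter]
  rw [zero_add]
  congr 1
  apply List.countP_congr
  intro p hp
  have hmem : p.2 ∈ P.map (fun q => q.2) := List.mem_map_of_mem hp
  have hcount : ((P.map (fun q => q.2)).count p.2 : Int)
      = (P.countP (fun q => q.2 == p.2) : Int) := by
    rw [List.count_eq_countP, List.countP_map]
    rfl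
  have hlen : PySem.Set.len ((P.filter (fun q => q.2 == p.2)).map (fun q => q.1))
      = (P.countP (fun q => q.2 == p.2) : Int) := by
    simp [PySem.Set.len, List.countP_eq_length_filter]
  have hkey : decide (k ≤ PySem.Set.len ((P.filter (fun q => q.2 == p.2)).map (fun q => q.1)))
      = PySem.Set.contains
        (PySem.Set.ofList
          ((((P.foldl
              (fun (d : PySem.Dict String Int) p => PySem.Dict.insert d p.2 (PySem.Dict.getD d p.2 0 + 1))
              PySem.Dict.empty)).items.filter (fun it => k ≤ it.2)).map (fun it => it.1))) p.2 := by
    have hc : ∀ (s : PySem.Set String) (x : String), PySem.Set.contains s x = true ↔ x ∈ s := by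
      intro s x; simp [PySem.Set.contains]
    rw [Bool.eq_iff_iff, hc, mem_banned]
    simp [hmem, hlen, hcount, List.countP_eq_length_filter]
  simp only [Function.comp_apply]
  rw [hkey, Bool.and_comm]

-- ===== VERDICT (by name: the statement is the Claim_ definition above) =====
theorem solution_spec : Claim_equal_solution := by
  intro id_list report k _ _
  exact solution_eq_alt id_list report k
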